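-- pv_equiv track=rewrite | github.com/imsoncod/Python-Algorithm | Programmers/쇠막대기.py | solution
-- ===== SOURCE A (Python) =====
-- def solution(arr):
--     a = 0   # "("의 개수
--     answer = 0
--     arr = arr.replace("()","!") # "()"을 "!"로 바꿈
--     for i in arr:
--         if i == "(": # "("일 경우 "("의 개수와 answer 를 +1
--             a += 1
--             answer += 1
--         elif i == "!": # "!"일 경우 "("의 개수만큼 answer를 +
--             answer += a
--         elif i == ")": # ")"일 경우 "("의 개수를 -1
--             a -= 1
--     return answer
-- ===== SOURCE B (Python) =====
-- def solution(arr):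
--     # Right-to-left scan: count lasers seen so far instead of open-bar depth.
--     # A bar-opening '(' contributes 1 + (lasers to its right); a bar-closing ')'
--     # subtracts the lasers to its right (they are beyond the bar's end).
--     lasers = 0
--     answer = 0
--     prev = None
--     for c in reversed(arr):
--         if c == ')':
--             answer -= lasers
--         elif c == '(':
--             if prev == ')':
--                 answer += lasers   # that ')' was this laser's end, not a bar close
--                 lasers += 1
--             else:
--                 answer += lasers + 1
--         prev = c
--     return answer
-- ===== Notes on version B (the rewrite author's own statement) =====
-- stated objective: alternative
-- what changed: B scans the string right-to-left maintaining the number of lasers seen so far and no depth counter: a bar-opening '(' adds 1 plus the lasers to its right, a bar-closing ')' subtracts the lasers to its right, whereas A preprocesses with replace('()','!') and does a forward scan accumulating the open-bar depth at each laser.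
-- outside the precondition, e.g. on solution('((!'): A returns 4, B returns 2
import Mathlib
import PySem

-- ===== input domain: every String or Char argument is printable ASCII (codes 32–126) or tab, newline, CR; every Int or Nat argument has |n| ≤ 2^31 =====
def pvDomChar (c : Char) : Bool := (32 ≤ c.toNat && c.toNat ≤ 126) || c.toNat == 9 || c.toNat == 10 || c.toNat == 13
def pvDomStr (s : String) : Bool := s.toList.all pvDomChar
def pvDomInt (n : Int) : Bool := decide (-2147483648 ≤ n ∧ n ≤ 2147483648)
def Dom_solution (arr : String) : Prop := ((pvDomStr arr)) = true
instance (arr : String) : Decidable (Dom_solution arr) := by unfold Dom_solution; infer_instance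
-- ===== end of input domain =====

-- B scans right-to-left counting lasers seen so far (no depth counter, no
-- replace preprocessing): a different algorithm of the same cost.
-- ===== PORT A =====
def solution (arr : String) : Int :=
  -- a = 0; answer = 0; arr = arr.replace("()","!"); for i in arr: …
  let arr2 := PySem.Str.replace arr "()" "!"
  let st := arr2.toList.foldl
    (fun (s : Int × Int) i =>
      if i = '(' then (s.1 + 1, s.2 + 1)
      else if i = '!' then (s.1, s.2 + s.1)
      else if i = ')' then (s.1 - 1, s.2)
      else s) ((0 : Int), (0 : Int))
  st.2

-- ===== PORT B =====
-- state = (lasers, answer, prev); the 'for c in reversed(arr)' loop is a foldl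
-- over the reversed character list
def solutionAltStep (s : Int × Int × Option Char) (c : Char) : Int × Int × Option Char :=
  if c = ')' then (s.1, s.2.1 - s.1, some c)
  else if c = '(' then
    if s.2.2 = some ')' then (s.1 + 1, s.2.1 + s.1, some c)   -- laser end, undo + count laser
    else (s.1, s.2.1 + s.1 + 1, some c)                       -- bar opening
  else (s.1, s.2.1, some c)

def solution_alt (arr : String) : Int :=
  (arr.toList.reverse.foldl solutionAltStep ((0 : Int), (0 : Int), (none : Option Char))).2.1

-- ===== PRECONDITION & SPEC =====
-- Pre_ excludes strings containing '!', the sentinel character A's replace("()","!")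
-- preprocessing introduces: such inputs are outside the natural bracket-string domain,
-- and A's treatment of a pre-existing '!' as a laser there is an accident of its
-- implementation, which B (scanning the original string) does not reproduce.
def Pre_solution (arr : String) : Prop := '!' ∉ arr.toList
instance (arr : String) : Decidable (Pre_solution arr) := by unfold Pre_solution; infer_instance
def pvWitness_solution : String := "(((()(()()))(())"
def Spec_solution (arr : String) (out : Int) : Prop := out = solution_alt arr
instance (arr : String) (out : Int) : Decidable (Spec_solution arr out) := by unfold Spec_solution; infer_instance

-- ===== CLAIM (what is proved, stated in full; the proofs are below) =====
def Claim_equal_solution : Prop := ∀ (arr : String), Dom_solution arr → Pre_solution arr → Spec_solution arr (solution arr)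

-- ===== LEMMAS AND PROOFS =====

-- the result of A's replace("()","!") as a simple recursion
def repl : List Char → List Char
  | [] => []
  | '(' :: ')' :: t => '!' :: repl t
  | c :: t => c :: repl t

-- common reference recursion: (lasers, answer) of a suffix
def pvG : List Char → Int × Int
  | [] => (0, 0)
  | '(' :: ')' :: t => ((pvG t).1 + 1, (pvG t).2)
  | '(' :: t => ((pvG t).1, (pvG t).2 + (pvG t).1 + 1)
  | ')' :: t => ((pvG t).1, (pvG t).2 - (pvG t).1)
  | _ :: t => pvG t

theorem repl_cons (c : Char) (t : List Char) (h : ¬ (c = '(' ∧ t.head? = some ')')) :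
    repl (c :: t) = c :: repl t := by
  rw [repl.eq_def]
  split
  · simp_all
  · simp_all
  · simp_all

theorem pvG_laser (t : List Char) :
    pvG ('(' :: ')' :: t) = ((pvG t).1 + 1, (pvG t).2) :=
  pvG.eq_2 t

theorem pvG_open (t : List Char) (h : t.head? ≠ some ')') :
    pvG ('(' :: t) = ((pvG t).1, (pvG t).2 + (pvG t).1 + 1) :=
  pvG.eq_3 t (fun _ ht => h (by rw [ht]; rfl))

theorem pvG_close (t : List Char) :
    pvG (')' :: t) = ((pvG t).1, (pvG t).2 - (pvG t).1) :=
  pvG.eq_4 t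

theorem pvG_other (c : Char) (t : List Char) (h1 : c ≠ '(') (h2 : c ≠ ')') :
    pvG (c :: t) = pvG t :=
  pvG.eq_5 c t (fun _ hc _ => h1 hc) (fun hc => h1 hc) (fun hc => h2 hc)

theorem replace_go_eq (fuel : Nat) (l acc : List Char) (h : l.length ≤ fuel) :
    PySem.Chars.replace.go ['(', ')'] ['!'] fuel l acc = acc.reverse ++ repl l := by
  induction fuel generalizing l acc with
  | zero =>
    interval_cases hl : l.length
    simp at hl; subst hl
    simp [PySem.Chars.replace.go, repl]
  | succ n ih =>
    match l with
    | [] => simp [PySem.Chars.replace.go, repl]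
    | c :: t =>
      rw [PySem.Chars.replace.go]
      by_cases hp : List.isPrefixOf ['(', ')'] (c :: t)
      · obtain ⟨r, hr⟩ := List.isPrefixOf_iff_prefix.mp hp
        simp at hr
        obtain ⟨hc, t, rfl, rfl⟩ := hr
        simp only [hp, if_pos]
        rw [ih]
        · subst hc; simp [repl]
        · simp at h ⊢; omega
      · simp only [hp, if_neg, Bool.false_eq_true, not_false_iff]
        rw [ih t (c :: acc) (by simp at h ⊢; omega)]
        rw [repl_cons c t (by
          rintro ⟨rfl, hh⟩
          rcases t with _ | ⟨c', t'⟩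
          · simp at hh
          · simp at hh; subst hh
            exact hp (by simp [List.isPrefixOf]))]
        simp

theorem replace_eq (l : List Char) :
    PySem.Chars.replace l ['(', ')'] ['!'] = repl l := by
  rw [PySem.Chars.replace]
  simp [replace_go_eq l.length l [] le_rfl]

-- A's fold over repl l, expressed through pvG
theorem foldA_repl (l : List Char) (a ans : Int) (h : '!' ∉ l) :
    ((repl l).foldl
      (fun (s : Int × Int) i =>
        if i = '(' then (s.1 + 1, s.2 + 1)
        else if i = '!' then (s.1, s.2 + s.1)
        else if i = ')' then (s.1 - 1, s.2)
        else s) (a, ans)).2 = ans + a * (pvG l).1 + (pvG l).2 := by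
  induction l using repl.induct generalizing a ans with
  | case1 => simp [repl, pvG]
  | case2 t ih =>
    rw [repl, pvG_laser]
    simp only [List.foldl_cons, Char.reduceEq, reduceIte]
    rw [ih a (ans + a) (by simp_all)]
    ring
  | case3 c t hnot ih =>
    have hne : ¬ (c = '(' ∧ t.head? = some ')') := by
      rintro ⟨rfl, hh⟩
      rcases t with _ | ⟨c', t'⟩
      · simp at hh
      · simp at hh; exact hnot t' rfl (by rw [hh])
    rw [repl_cons c t hne]
    have hbang : c ≠ '!' := fun hc => h (hc ▸ List.mem_cons_self ..)
    have ht : '!' ∉ t := fun hm => h (List.mem_cons_of_mem _ hm)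
    simp only [List.foldl_cons]
    by_cases hc1 : c = '('
    · subst hc1
      rw [pvG_open t (fun hh => hne ⟨rfl, hh⟩)]
      simp only [Char.reduceEq, reduceIte]
      rw [ih (a + 1) (ans + 1) ht]
      ring
    · by_cases hc2 : c = ')'
      · subst hc2
        rw [pvG_close]
        simp only [Char.reduceEq, reduceIte]
        rw [ih (a - 1) ans ht]
        ring
      · rw [pvG_other c t hc1 hc2]
        simp only [if_neg hc1, if_neg hbang, if_neg hc2]
        exact ih a ans ht

-- B's reversed foldl as a foldr, expressed through pvG (prev = head of the suffix)
theorem foldB_eq (l : List Char) :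
    l.foldr (fun c s => solutionAltStep s c) ((0 : Int), (0 : Int), (none : Option Char))
      = ((pvG l).1, (pvG l).2, l.head?) := by
  induction l using pvG.induct with
  | case1 => simp [pvG]
  | case2 t ih =>
    rw [List.foldr_cons, List.foldr_cons, ih, pvG_laser]
    simp [solutionAltStep]
  | case3 t h ih =>
    -- the '(' :: t case where t does not start with ')'
    have hh : t.head? ≠ some ')' := by
      rcases t with _ | ⟨c', t'⟩
      · simp
      · simp only [List.head?_cons]
        intro he; exact h t' (by rw [Option.some.inj he])
    rw [List.foldr_cons, ih, pvG_open t hh]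
    simp [solutionAltStep, hh]
  | case4 t ih =>
    rw [List.foldr_cons, ih, pvG_close]
    simp [solutionAltStep]
  | case5 c t h1 h2 h3 ih =>
    have hc1 : c ≠ '(' := fun hc => h2 hc
    have hc2 : c ≠ ')' := fun hc => h3 hc
    rw [List.foldr_cons, ih, pvG_other c t hc1 hc2]
    simp [solutionAltStep, hc1, hc2]

theorem solution_alt_eq (arr : String) : solution_alt arr = (pvG arr.toList).2 := by
  unfold solution_alt
  rw [List.foldl_reverse, foldB_eq]

-- ===== VERDICT (by name: the statement is the Claim_ definition above) =====
theorem solution_spec : Claim_equal_solution := by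
  intro arr _ hpre
  unfold Spec_solution solution
  simp only [PySem.Str.toList_replace]
  rw [show ("()" : String).toList = ['(', ')'] from rfl,
      show ("!" : String).toList = ['!'] from rfl, replace_eq,
      solution_alt_eq, foldA_repl arr.toList 0 0 hpre]
  ring
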